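-- pv_equiv track=rewrite | github.com/lcsavb/autocusto | pdf_field_extractor.py | parse_pdftk_output
-- ===== SOURCE A (Python) =====
-- def parse_pdftk_output(output):
--     """Parse pdftk dump_data_fields output into structured data"""
--     fields = []
--     current_field = {}
--
--     for line in output.strip().split('\n'):
--         if line.startswith('---'):
--             if current_field:
--                 fields.append(current_field)
--                 current_field = {}
--         elif ':' in line:
--             key, value = line.split(':', 1)
--             current_field[key.strip()] = value.strip()
--
--     if current_field:
--         fields.append(current_field)
--
--     return fields
-- ===== SOURCE B (Python) =====
-- def parse_pdftk_output(output):
--     """Parse pdftk dump_data_fields output into structured data"""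
--     lines = output.strip().split('\n')
--     # phase 1: group the lines into blocks delimited by '---' separator lines
--     blocks = []
--     block = []
--     for line in lines:
--         if line.startswith('---'):
--             blocks.append(block)
--             block = []
--         else:
--             block.append(line)
--     blocks.append(block)
--     # phase 2: build one dict per block, keep the non-empty ones
--     fields = []
--     for block in blocks:
--         field = {}
--         for line in block:
--             if ':' in line:
--                 key, value = line.split(':', 1)
--                 field[key.strip()] = value.strip()
--         if field:
--             fields.append(field)
--     return fields
-- ===== Notes on version B (the rewrite author's own statement) =====
-- stated objective: alternative
-- what changed: Replaces A's single pass with a running dict and flush-on-separator by a two-phase decomposition: first group the lines into separator-delimited blocks, then build one dict per block and keep the non-empty ones.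
import Mathlib
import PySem

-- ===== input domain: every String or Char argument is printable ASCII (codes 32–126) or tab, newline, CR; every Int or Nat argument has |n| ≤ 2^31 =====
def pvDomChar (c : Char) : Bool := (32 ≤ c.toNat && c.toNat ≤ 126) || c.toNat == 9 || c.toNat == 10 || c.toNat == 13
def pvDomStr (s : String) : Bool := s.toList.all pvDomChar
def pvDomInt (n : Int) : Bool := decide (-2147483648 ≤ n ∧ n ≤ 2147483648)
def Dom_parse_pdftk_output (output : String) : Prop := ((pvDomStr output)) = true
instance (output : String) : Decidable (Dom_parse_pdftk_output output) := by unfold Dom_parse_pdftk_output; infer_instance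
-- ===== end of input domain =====

-- B replaces A's single running-accumulator-with-flush pass by a two-phase decomposition
-- (group lines into '---'-delimited blocks, then build one dict per block); same cost, clearer structure.

-- ===== PORT A =====
def pvStepA (st : List (List (String × String)) × PySem.Dict String String) (line : String) :
    List (List (String × String)) × PySem.Dict String String :=
  if PySem.Str.startswith line "---" then
    (if st.2.items ≠ [] then (st.1 ++ [st.2.items], PySem.Dict.empty) else st)
  else if PySem.Str.isIn ":" line then
    match PySem.Str.splitMax? line ":" 1 with
    | some [key, value] => (st.1, st.2.insert (PySem.Str.strip key) (PySem.Str.strip value))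
    | _ => st
  else st

def parse_pdftk_output (output : String) : List (List (String × String)) :=
  let st := (((PySem.Str.split? (PySem.Str.strip output) "\n").getD [])).foldl pvStepA ([], PySem.Dict.empty)
  if st.2.items ≠ [] then st.1 ++ [st.2.items] else st.1

-- ===== PORT B =====
-- one line of a block folded into the block's dict (the body of B's inner loop)
def pvLineKV (d : PySem.Dict String String) (line : String) : PySem.Dict String String :=
  if PySem.Str.isIn ":" line then
    match PySem.Str.splitMax? line ":" 1 with
    | some [key, value] => d.insert (PySem.Str.strip key) (PySem.Str.strip value)
    | _ => d
  else d

def pvBlockDict (block : List String) : List (String × String) :=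
  (block.foldl pvLineKV PySem.Dict.empty).items

-- phase-1 step: state = (finished blocks, current block)
def pvStepB (st : List (List String) × List String) (line : String) :
    List (List String) × List String :=
  if PySem.Str.startswith line "---" then (st.1 ++ [st.2], []) else (st.1, st.2 ++ [line])

-- phase-2 step: append the block's dict if non-empty
def pvPushB (fs : List (List (String × String))) (block : List String) :
    List (List (String × String)) :=
  let field := pvBlockDict block
  if field ≠ [] then fs ++ [field] else fs

def parse_pdftk_output_alt (output : String) : List (List (String × String)) :=
  let st := (((PySem.Str.split? (PySem.Str.strip output) "\n").getD [])).foldl pvStepB ([], [])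
  (st.1 ++ [st.2]).foldl pvPushB []

-- ===== PRECONDITION & SPEC =====
def Spec_parse_pdftk_output (output : String) (out : List (List (String × String))) : Prop := out = parse_pdftk_output_alt output
instance (output : String) (out : List (List (String × String))) : Decidable (Spec_parse_pdftk_output output out) := by unfold Spec_parse_pdftk_output; infer_instance

-- ===== CLAIM (what is proved, stated in full; the proofs are below) =====
def Claim_equal_parse_pdftk_output : Prop := ∀ (output : String), Dom_parse_pdftk_output output → Spec_parse_pdftk_output output (parse_pdftk_output output)

-- ===== LEMMAS AND PROOFS =====

-- common characterisation: the fields produced from the remaining lines, starting with current dict d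
def pvG (ls : List String) (d : PySem.Dict String String) : List (List (String × String)) :=
  match ls with
  | [] => if d.items ≠ [] then [d.items] else []
  | l :: ls =>
    if PySem.Str.startswith l "---" then
      (if d.items ≠ [] then d.items :: pvG ls PySem.Dict.empty else pvG ls d)
    else pvG ls (pvLineKV d l)

lemma pvA_eq_g (ls : List String) (fs : List (List (String × String)))
    (d : PySem.Dict String String) :
    (if (ls.foldl pvStepA (fs, d)).2.items ≠ [] then
        (ls.foldl pvStepA (fs, d)).1 ++ [(ls.foldl pvStepA (fs, d)).2.items]
      else (ls.foldl pvStepA (fs, d)).1) = fs ++ pvG ls d := by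
  induction ls generalizing fs d with
  | nil => simp only [List.foldl_nil, pvG]; split_ifs <;> simp
  | cons l ls ih =>
    rw [List.foldl_cons]
    by_cases h1 : PySem.Str.startswith l "---" = true
    · have h1' : PySem.Chars.startswith l.toList ['-', '-', '-'] = true := by simpa using h1
      by_cases h2 : d.items ≠ []
      · rw [show pvStepA (fs, d) l = (fs ++ [d.items], PySem.Dict.empty) from by
          simp [pvStepA, h1', h2]]
        rw [ih]
        simp only [pvG, if_pos h1, if_pos h2]
        simp
      · rw [show pvStepA (fs, d) l = (fs, d) from by simp [pvStepA, h1', h2]]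
        rw [ih]
        simp only [pvG, if_pos h1, if_neg h2]
    · have hstep : pvStepA (fs, d) l = (fs, pvLineKV d l) := by
        simp only [pvStepA, pvLineKV]
        split_ifs with h3
        · rcases hsp : PySem.Str.splitMax? l ":" 1 with _ | ⟨_ | ⟨k, _ | ⟨v, _ | _⟩⟩⟩ <;>
            simp [hsp]
        · rfl
      rw [hstep, ih]
      simp only [pvG, if_neg h1]

lemma pv_empty_of_items_nil (d : PySem.Dict String String) (h : d.items = []) :
    d = PySem.Dict.empty := by
  apply PySem.Dict.ext; simpa [PySem.Dict.empty] using h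

lemma pvB_eq_g (ls : List String) (bs : List (List String)) (cur : List String) :
    ((ls.foldl pvStepB (bs, cur)).1 ++ [(ls.foldl pvStepB (bs, cur)).2]).foldl pvPushB [] =
      bs.foldl pvPushB [] ++ pvG ls (cur.foldl pvLineKV PySem.Dict.empty) := by
  induction ls generalizing bs cur with
  | nil =>
    simp only [List.foldl_nil, pvG, List.foldl_append, List.foldl_cons, pvPushB, pvBlockDict]
    split_ifs <;> simp
  | cons l ls ih =>
    rw [List.foldl_cons]
    simp only [pvG, pvStepB]
    split_ifs with h1 h2
    · rw [ih]
      simp only [List.foldl_append, List.foldl_cons, List.foldl_nil, pvPushB, pvBlockDict]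
      rw [if_pos h2]
      simp [List.append_assoc]
    · rw [ih]
      simp only [List.foldl_append, List.foldl_cons, List.foldl_nil, pvPushB, pvBlockDict]
      rw [if_neg h2]
      congr 1
      rw [pv_empty_of_items_nil (cur.foldl pvLineKV PySem.Dict.empty) (by simpa using h2)]
    · rw [ih]
      congr 2
      simp [List.foldl_append, pvLineKV]

-- ===== VERDICT (by name: the statement is the Claim_ definition above) =====
theorem parse_pdftk_output_spec : Claim_equal_parse_pdftk_output := by
  intro output _
  unfold Spec_parse_pdftk_output
  show parse_pdftk_output output = parse_pdftk_output_alt output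
  simp only [parse_pdftk_output, parse_pdftk_output_alt]
  rw [pvA_eq_g, pvB_eq_g]
  simp
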